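-- pv_equiv track=rewrite | github.com/thepratholic/Competitive-Programming | LeetCode/Biweekly Contest 178/First Unique Even Element.py | firstUniqueEven
-- ===== SOURCE A (Python) =====
-- from typing import DefaultDict
--
-- def firstUniqueEven(nums: list[int]) -> int:
--     n = len(nums)
--
--     mpp = DefaultDict(int)
--
--     for i, v in enumerate(nums):
--         if v % 2 == 0:
--             mpp[v] += 1
--
--
--     for x in nums:
--         if mpp[x] == 1:
--             return x
--
--     return -1
-- ===== SOURCE B (Python) =====
-- def firstUniqueEven(nums: list[int]) -> int:
--     rest = list(nums)
--     while rest: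
--         x = rest.pop(0)
--         if x % 2:
--             continue
--         if x not in rest:
--             return x
--         rest = [y for y in rest if y != x]
--     return -1
-- ===== Notes on version B (the rewrite author's own statement) =====
-- stated objective: alternative
-- what changed: Replaced the frequency-table build plus second lookup pass with a duplicate-elimination loop over a shrinking work list: pop the head, skip odds, answer if the head no longer occurs in the remainder, otherwise delete all its copies and continue - no counting structure at all, and the loop exits as soon as a unique even is reached.
import Mathlib
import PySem

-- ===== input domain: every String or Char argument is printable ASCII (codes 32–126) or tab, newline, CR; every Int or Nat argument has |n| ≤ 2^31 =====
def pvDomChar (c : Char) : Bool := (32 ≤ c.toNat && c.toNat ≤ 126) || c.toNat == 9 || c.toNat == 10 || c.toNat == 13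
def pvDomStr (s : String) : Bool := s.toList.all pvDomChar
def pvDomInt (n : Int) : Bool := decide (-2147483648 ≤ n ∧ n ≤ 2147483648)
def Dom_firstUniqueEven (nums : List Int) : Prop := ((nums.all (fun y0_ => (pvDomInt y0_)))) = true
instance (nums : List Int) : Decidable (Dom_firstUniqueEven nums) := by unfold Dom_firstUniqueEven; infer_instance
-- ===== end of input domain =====

-- B replaces A's frequency-table build + second lookup pass with a duplicate-elimination loop
-- over a shrinking work list (pop head; skip odds; answer if head absent from the remainder;
-- otherwise delete all its copies) — no counting structure (objective: alternative, not faster).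

-- ===== PORT A =====
-- the first loop: for i, v in enumerate(nums): if v % 2 == 0: mpp[v] += 1
def pvAMap (nums : List Int) : PySem.Dict Int Int :=
  (PySem.List.enumerate nums 0).foldl
    (fun d iv => if PySem.Int.mod iv.2 2 = 0 then d.modify iv.2 0 (· + 1) else d)
    PySem.Dict.empty

-- the second loop: for x in nums: if mpp[x] == 1: return x   (defaultdict: missing key reads 0)
def pvAScan (mpp : PySem.Dict Int Int) : List Int → Int
  | [] => -1
  | x :: rest => if mpp.getD x 0 = 1 then x else pvAScan mpp rest

def firstUniqueEven (nums : List Int) : Int :=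
  pvAScan (pvAMap nums) nums

-- ===== PORT B =====
-- the while loop over the work list `rest`: x = rest.pop(0); if x % 2: continue;
-- if x not in rest: return x; rest = [y for y in rest if y != x]
def pvBLoop : List Int → Int
  | [] => -1
  | x :: rest =>
      if PySem.Int.mod x 2 ≠ 0 then pvBLoop rest
      else if x ∉ rest then x
      else pvBLoop (rest.filter (fun y => decide (y ≠ x)))
termination_by l => l.length
decreasing_by
  · simp
  · simp only [List.length_unattach]
    exact Nat.lt_succ_of_le (le_trans (List.length_filter_le _ _) (by simp))

def firstUniqueEven_alt (nums : List Int) : Int :=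
  pvBLoop nums

-- ===== PRECONDITION & SPEC =====
def Spec_firstUniqueEven (nums : List Int) (out : Int) : Prop := out = firstUniqueEven_alt nums
instance (nums : List Int) (out : Int) : Decidable (Spec_firstUniqueEven nums out) := by unfold Spec_firstUniqueEven; infer_instance

-- ===== CLAIM (what is proved, stated in full; the proofs are below) =====
def Claim_equal_firstUniqueEven : Prop := ∀ (nums : List Int), Dom_firstUniqueEven nums → Spec_firstUniqueEven nums (firstUniqueEven nums)

-- ===== LEMMAS AND PROOFS =====

-- common characterisation: first y in the list satisfying p, else -1
def pvFirstSat (p : Int → Bool) : List Int → Int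
  | [] => -1
  | y :: ys => if p y then y else pvFirstSat p ys

-- "y is a first-unique-even candidate of nums"
def pvP (nums : List Int) (y : Int) : Bool :=
  decide (PySem.Int.mod y 2 = 0) && (nums.count y == 1)

theorem pvFirstSat_congr (p q : Int → Bool) (l : List Int)
    (h : ∀ y ∈ l, p y = q y) : pvFirstSat p l = pvFirstSat q l := by
  induction l with
  | nil => rfl
  | cons y ys ih =>
      simp only [pvFirstSat, h y (List.mem_cons_self ..)]
      rw [ih (fun z hz => h z (List.mem_cons_of_mem _ hz))]

theorem pvFirstSat_filter (p : Int → Bool) (x : Int) (hx : p x = false) (l : List Int) :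
    pvFirstSat p l = pvFirstSat p (l.filter (fun y => decide (y ≠ x))) := by
  induction l with
  | nil => rfl
  | cons y ys ih =>
      by_cases hyx : y = x
      · subst hyx
        simp only [pvFirstSat, hx, List.filter_cons, decide_not, Bool.false_eq_true, if_false]
        simpa using ih
      · simp only [pvFirstSat, List.filter_cons]
        have : (decide (y ≠ x)) = true := by simpa using hyx
        simp only [this, if_true, pvFirstSat, ih]

-- ---- A side: A = pvFirstSat (pvP nums) nums ----

-- A's first loop ignores the enumerate index, so it is a fold over the values.
theorem pvAMap_eq_foldl (nums : List Int) (s : Int) (d : PySem.Dict Int Int) :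
    (PySem.List.enumerate nums s).foldl
        (fun d iv => if PySem.Int.mod iv.2 2 = 0 then d.modify iv.2 0 (· + 1) else d) d =
      nums.foldl (fun d v => if PySem.Int.mod v 2 = 0 then d.modify v 0 (· + 1) else d) d := by
  induction nums generalizing s d with
  | nil => rfl
  | cons x xs ih =>
      simp only [PySem.List.enumerate_cons, List.foldl_cons]
      exact ih _ _

-- the conditional fold only touches the even elements
theorem pvFold_filter (nums : List Int) (d : PySem.Dict Int Int) :
    nums.foldl (fun d v => if PySem.Int.mod v 2 = 0 then d.modify v 0 (· + 1) else d) d =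
      (nums.filter (fun v => decide (PySem.Int.mod v 2 = 0))).foldl
        (fun d v => d.modify v 0 (· + 1)) d := by
  induction nums generalizing d with
  | nil => rfl
  | cons x xs ih =>
      simp only [List.foldl_cons, List.filter_cons]
      by_cases hx : PySem.Int.mod x 2 = 0
      · simp only [hx, if_pos, decide_true, List.foldl_cons]
        exact ih _
      · simp only [hx, decide_false, if_false, Bool.false_eq_true]
        exact ih _

-- lookup in A's dict = count among the even elements
theorem pvAMap_getD (nums : List Int) (x : Int) :
    (pvAMap nums).getD x 0 =
      ((nums.filter (fun v => decide (PySem.Int.mod v 2 = 0))).count x : Int) := by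
  unfold pvAMap
  rw [pvAMap_eq_foldl, pvFold_filter, ← PySem.Dict.counter_eq_foldl, PySem.Dict.getD_counter]

-- A's second loop is pvFirstSat of the candidate predicate
theorem pvAScan_eq (nums rem : List Int) :
    pvAScan (pvAMap nums) rem = pvFirstSat (pvP nums) rem := by
  induction rem with
  | nil => rfl
  | cons x rest ih =>
      simp only [pvAScan, pvFirstSat, pvAMap_getD, ih]
      congr 1
      by_cases hx : PySem.Int.mod x 2 = 0
      · have hdvd : (2:Int) ∣ x := (PySem.Int.mod_eq_zero_iff_dvd x 2).mp hx
        rw [List.count_filter (by simpa using hx)]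
        simp [pvP, hdvd]
      · have hndvd : ¬(2:Int) ∣ x := fun h => hx ((PySem.Int.mod_eq_zero_iff_dvd x 2).mpr h)
        have h0 : (nums.filter (fun v => decide (PySem.Int.mod v 2 = 0))).count x = 0 := by
          rw [List.count_eq_zero]
          intro hmem
          exact hx (by simpa using (List.mem_filter.mp hmem).2)
        rw [h0]
        simp [pvP, hndvd]

-- ---- B side: B = pvFirstSat (pvP nums) nums ----

theorem pvBLoop_eq (l : List Int) : pvBLoop l = pvFirstSat (pvP l) l := by
  induction hn : l.length using Nat.strong_induction_on generalizing l with
  | _ n ih =>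
  match l with
  | [] => rw [pvBLoop]; rfl
  | x :: rest =>
    have hn' : rest.length + 1 = n := by simpa using hn
    by_cases hx : PySem.Int.mod x 2 = 0
    · have hdvd : (2:Int) ∣ x := (PySem.Int.mod_eq_zero_iff_dvd x 2).mp hx
      by_cases hmem : x ∈ rest
      · -- even, duplicated head: B drops every copy of x; neither side can answer x
        have hcnt : rest.count x ≠ 0 := fun h => (List.count_eq_zero.mp h) hmem
        have hpx : pvP (x :: rest) x = false := by
          have h1 : (x :: rest).count x = rest.count x + 1 := List.count_cons_self ..
          simp [pvP, h1]
          omega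
        rw [pvBLoop, if_neg (not_not_intro hx), if_neg (not_not_intro hmem)]
        have hlen : (rest.filter (fun y => decide (y ≠ x))).length < n :=
          lt_of_le_of_lt (List.length_filter_le _ _) (by omega)
        rw [ih _ hlen _ rfl]
        rw [show pvFirstSat (pvP (x :: rest)) (x :: rest)
              = pvFirstSat (pvP (x :: rest)) rest by simp [pvFirstSat, hpx]]
        rw [pvFirstSat_filter (pvP (x :: rest)) x hpx rest]
        apply pvFirstSat_congr
        intro y hy
        have hyx : y ≠ x := by simpa using (List.mem_filter.mp hy).2
        have h1 : (x :: rest).count y = rest.count y := by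
          rw [List.count_cons]; simp [Ne.symm hyx]
        have h2 : (rest.filter (fun y => decide (y ≠ x))).count y = rest.count y :=
          List.count_filter (by simpa using hyx)
        simp only [ne_eq, decide_not] at h2
        simp [pvP, h1, h2]
      · -- even, unique head: both sides answer x
        have hcnt : rest.count x = 0 := List.count_eq_zero.mpr hmem
        have hpx : pvP (x :: rest) x = true := by
          have h1 : (x :: rest).count x = rest.count x + 1 := List.count_cons_self ..
          simp [pvP, hdvd, h1, hcnt]
        rw [pvBLoop, if_neg (not_not_intro hx), if_pos hmem]
        simp [pvFirstSat, hpx]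
    · -- odd head: skipped on both sides; counts of even values unchanged
      have hndvd : ¬(2:Int) ∣ x := fun h => hx ((PySem.Int.mod_eq_zero_iff_dvd x 2).mpr h)
      have hpx : pvP (x :: rest) x = false := by simp [pvP, hndvd]
      rw [pvBLoop, if_pos hx]
      have hlen : rest.length < n := by omega
      rw [ih _ hlen _ rfl]
      rw [show pvFirstSat (pvP (x :: rest)) (x :: rest)
            = pvFirstSat (pvP (x :: rest)) rest by simp [pvFirstSat, hpx]]
      apply pvFirstSat_congr
      intro y _
      by_cases hy2 : (2:Int) ∣ y
      · have hyx : y ≠ x := fun h => hndvd (h ▸ hy2)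
        have h1 : (x :: rest).count y = rest.count y := by
          rw [List.count_cons]; simp [Ne.symm hyx]
        simp [pvP, h1]
      · simp [pvP, hy2]

-- ===== VERDICT (by name: the statement is the Claim_ definition above) =====
theorem firstUniqueEven_spec : Claim_equal_firstUniqueEven := by
  intro nums _
  unfold Spec_firstUniqueEven firstUniqueEven firstUniqueEven_alt
  rw [pvAScan_eq, pvBLoop_eq]
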